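-- pv_equiv track=rewrite | github.com/Uniformedi/InsideLLM | configs/litellm/callbacks/humility_guardrail.py | _build_reframe_instructions
-- ===== SOURCE A (Python) =====
-- REFRAMABLE_REASONS = {
--     "Humility 2": "uncertainty",
--     "Humility 4": "human_consensus",
--     "Humility 6": "domain_boundary",
-- }
--
-- def _build_reframe_instructions(reasons: list[str]) -> str | None:
--     """Build reframing instructions for soft-deny reasons."""
--     categories = set()
--     for reason in reasons:
--         for key, cat in REFRAMABLE_REASONS.items():
--             if key in reason:
--                 categories.add(cat)
--
--     instructions = []
--
--     if "uncertainty" in categories: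
--         instructions.append(
--             "IMPORTANT: Your response involves a high-impact topic. You MUST explicitly "
--             "acknowledge uncertainty and limitations in your answer. Use phrases like "
--             "'based on available information', 'I recommend consulting a professional', "
--             "or 'this should be verified by a qualified human expert'."
--         )
--     if "human_consensus" in categories:
--         instructions.append(
--             "IMPORTANT: This topic involves restricted or sensitive information. "
--             "Frame your response as informational guidance only and explicitly "
--             "recommend human expert review before any action is taken."
--         )
--     if "domain_boundary" in categories:
--         instructions.append(
--             "IMPORTANT: This question may extend beyond your validated knowledge. "
--             "Clearly state the boundaries of your knowledge and recommend "
--             "authoritative sources for verification."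
--         )
--
--     if instructions:
--         return "\n\n".join(instructions)
--     return None
-- ===== SOURCE B (Python) =====
-- _REFRAME_TABLE = [
--     ("Humility 2",
--         "IMPORTANT: Your response involves a high-impact topic. You MUST explicitly "
--         "acknowledge uncertainty and limitations in your answer. Use phrases like "
--         "'based on available information', 'I recommend consulting a professional', "
--         "or 'this should be verified by a qualified human expert'."),
--     ("Humility 4",
--         "IMPORTANT: This topic involves restricted or sensitive information. "
--         "Frame your response as informational guidance only and explicitly "
--         "recommend human expert review before any action is taken."),
--     ("Humility 6",
--         "IMPORTANT: This question may extend beyond your validated knowledge. "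
--         "Clearly state the boundaries of your knowledge and recommend "
--         "authoritative sources for verification."),
-- ]
--
-- def _build_reframe_instructions(reasons: list[str]) -> str | None:
--     parts = [text for key, text in _REFRAME_TABLE
--              if any(key in reason for reason in reasons)]
--     return "\n\n".join(parts) if parts else None
-- ===== Notes on version B (the rewrite author's own statement) =====
-- stated objective: simpler
-- what changed: Replaces the two-pass shape (build a category set over reasons, then three fixed if-branches appending texts) with a single category-outer table-driven comprehension: one ordered key->text table, appending a text exactly when some reason contains its key; no intermediate set.
import Mathlib
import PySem

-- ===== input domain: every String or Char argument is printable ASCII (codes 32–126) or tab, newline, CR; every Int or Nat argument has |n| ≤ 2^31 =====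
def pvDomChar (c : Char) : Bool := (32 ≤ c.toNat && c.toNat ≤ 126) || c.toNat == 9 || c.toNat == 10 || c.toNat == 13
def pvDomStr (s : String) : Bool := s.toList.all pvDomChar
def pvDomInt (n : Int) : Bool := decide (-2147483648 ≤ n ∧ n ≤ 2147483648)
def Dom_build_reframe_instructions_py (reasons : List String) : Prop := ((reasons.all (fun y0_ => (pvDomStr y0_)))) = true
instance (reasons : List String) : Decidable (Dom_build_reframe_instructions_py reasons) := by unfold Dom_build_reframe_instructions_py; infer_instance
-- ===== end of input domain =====

-- B restates A's two-pass shape (category set, then three if-branches) as one table-driven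
-- pass appending a category's text when some reason contains its key; objective: simpler.

-- shared instruction-text constants (identical string literals in both Pythons)
def textUncertainty : String :=
  "IMPORTANT: Your response involves a high-impact topic. You MUST explicitly acknowledge uncertainty and limitations in your answer. Use phrases like 'based on available information', 'I recommend consulting a professional', or 'this should be verified by a qualified human expert'."
def textHumanConsensus : String :=
  "IMPORTANT: This topic involves restricted or sensitive information. Frame your response as informational guidance only and explicitly recommend human expert review before any action is taken."
def textDomainBoundary : String :=
  "IMPORTANT: This question may extend beyond your validated knowledge. Clearly state the boundaries of your knowledge and recommend authoritative sources for verification."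

-- ===== PORT A =====
-- REFRAMABLE_REASONS, a literal dict (iterated in insertion order)
def reframableReasons : List (String × String) :=
  [("Humility 2", "uncertainty"), ("Humility 4", "human_consensus"), ("Humility 6", "domain_boundary")]

-- body of A's outer loop: 'for key, cat in REFRAMABLE_REASONS.items(): if key in reason: categories.add(cat)'
def stepA (s : PySem.Set String) (reason : String) : PySem.Set String :=
  reframableReasons.foldl (fun s kc => if PySem.Str.isIn kc.1 reason then PySem.Set.add s kc.2 else s) s

def build_reframe_instructions_py (reasons : List String) : Option String :=
  let categories : PySem.Set String := reasons.foldl stepA PySem.Set.empty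
  let instructions : List String := []
  let instructions := if PySem.Set.contains categories "uncertainty" then instructions ++ [textUncertainty] else instructions
  let instructions := if PySem.Set.contains categories "human_consensus" then instructions ++ [textHumanConsensus] else instructions
  let instructions := if PySem.Set.contains categories "domain_boundary" then instructions ++ [textDomainBoundary] else instructions
  if instructions ≠ [] then some (PySem.Str.join "\n\n" instructions) else none

-- ===== PORT B =====
-- the ordered key -> instruction-text table of Source B
def reframeTable : List (String × String) :=
  [("Humility 2", textUncertainty), ("Humility 4", textHumanConsensus), ("Humility 6", textDomainBoundary)]

def build_reframe_instructions_py_alt (reasons : List String) : Option String :=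
  let parts := reframeTable.filterMap (fun kt => if reasons.any (fun r => PySem.Str.isIn kt.1 r) then some kt.2 else none)
  if parts.isEmpty then none else some (PySem.Str.join "\n\n" parts)

-- ===== PRECONDITION & SPEC =====
def Spec_build_reframe_instructions_py (reasons : List String) (out : Option String) : Prop := out = build_reframe_instructions_py_alt reasons
instance (reasons : List String) (out : Option String) : Decidable (Spec_build_reframe_instructions_py reasons out) := by unfold Spec_build_reframe_instructions_py; infer_instance

-- ===== CLAIM (what is proved, stated in full; the proofs are below) =====
def Claim_equal_build_reframe_instructions_py : Prop := ∀ (reasons : List String), Dom_build_reframe_instructions_py reasons → Spec_build_reframe_instructions_py reasons (build_reframe_instructions_py reasons)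

-- ===== LEMMAS AND PROOFS =====

-- membership in the category set after one reason
theorem mem_stepA (s : PySem.Set String) (r c : String) :
    c ∈ stepA s r ↔ c ∈ s ∨ ∃ kc ∈ reframableReasons, PySem.Str.isIn kc.1 r = true ∧ c = kc.2 := by
  simp only [stepA, reframableReasons, List.foldl]
  split_ifs <;> simp_all [PySem.Set.mem_add] <;> tauto

-- membership in the category set after the whole loop
theorem mem_foldA (reasons : List String) (s : PySem.Set String) (c : String) :
    c ∈ reasons.foldl stepA s ↔ c ∈ s ∨ ∃ r ∈ reasons, ∃ kc ∈ reframableReasons, PySem.Str.isIn kc.1 r = true ∧ c = kc.2 := by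
  induction reasons generalizing s with
  | nil => simp
  | cons x xs ih => simp [List.foldl, ih, mem_stepA, or_assoc]

theorem contains_foldA (reasons : List String) (key c : String)
    (hmem : (key, c) ∈ reframableReasons)
    (h : ∀ kc ∈ reframableReasons, c = kc.2 → kc = (key, c)) :
    PySem.Set.contains (reasons.foldl stepA PySem.Set.empty) c
      = reasons.any (fun r => PySem.Str.isIn key r) := by
  rw [Bool.eq_iff_iff, PySem.Set.contains_iff, mem_foldA, List.any_eq_true]
  constructor
  · rintro (hc | ⟨r, hr, kc, hkc, hin, hc⟩)
    · simp [PySem.Set.empty] at hc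
    · exact ⟨r, hr, by rw [h kc hkc hc] at hin; exact hin⟩
  · rintro ⟨r, hr, hin⟩
    exact Or.inr ⟨r, hr, (key, c), hmem, hin, rfl⟩

-- ===== VERDICT (by name: the statement is the Claim_ definition above) =====
theorem build_reframe_instructions_py_spec : Claim_equal_build_reframe_instructions_py := by
  intro reasons _
  have e1 := contains_foldA reasons "Humility 2" "uncertainty" (by decide) (by decide)
  have e2 := contains_foldA reasons "Humility 4" "human_consensus" (by decide) (by decide)
  have e3 := contains_foldA reasons "Humility 6" "domain_boundary" (by decide) (by decide)
  unfold Spec_build_reframe_instructions_py build_reframe_instructions_py build_reframe_instructions_py_alt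
  simp only [e1, e2, e3]
  cases h1 : reasons.any (fun r => PySem.Str.isIn "Humility 2" r) <;>
  cases h2 : reasons.any (fun r => PySem.Str.isIn "Humility 4" r) <;>
  cases h3 : reasons.any (fun r => PySem.Str.isIn "Humility 6" r) <;>
    simp only [reframeTable, List.filterMap_cons, List.filterMap_nil, h1, h2, h3] <;> simp
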